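-- pv_equiv track=rewrite | github.com/annieco29/budget_coach_agent | plaid_transactions.py | _map_plaid_category
-- ===== SOURCE A (Python) =====
-- from typing import List
--
-- def _map_plaid_category(plaid_category: List[str]) -> str:
--     """
--     Map Plaid categories to our budget coach categories.
--     """
--     if not plaid_category:
--         return 'Other'
--
--     category = plaid_category[0].lower()
--
--     # Dining categories
--     if any(word in category for word in ['restaurant', 'cafe', 'coffee', 'bar', 'pub', 'food', 'dining']):
--         return 'Dining'
--
--     # Shopping categories
--     if any(word in category for word in ['amazon', 'walmart', 'target', 'store', 'shop', 'retail']):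
--         return 'Shopping'
--
--     # Entertainment categories
--     if any(word in category for word in ['netflix', 'spotify', 'hulu', 'entertainment', 'movie', 'theater']):
--         return 'Entertainment'
--
--     # Travel categories
--     if any(word in category for word in ['united', 'airline', 'hotel', 'travel', 'flight']):
--         return 'Travel'
--
--     # Transportation categories
--     if any(word in category for word in ['uber', 'lyft', 'taxi', 'transit', 'parking']):
--         return 'Transportation'
--
--     # Utilities categories
--     if any(word in category for word in ['electric', 'water', 'gas', 'utility', 'internet', 'phone']):
--         return 'Utilities'
--
--     return 'Other'
-- ===== SOURCE B (Python) =====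
-- from typing import List
--
-- # Inverted approach: instead of scanning keyword lists and doing a substring
-- # search for each keyword, enumerate the substrings of the text once and look
-- # each up in a keyword -> (priority, category) hash map, keeping the hit with
-- # the smallest priority (= first rule in the original order).
-- _RULES = [
--     ('Dining', ['restaurant', 'cafe', 'coffee', 'bar', 'pub', 'food', 'dining']),
--     ('Shopping', ['amazon', 'walmart', 'target', 'store', 'shop', 'retail']),
--     ('Entertainment', ['netflix', 'spotify', 'hulu', 'entertainment', 'movie', 'theater']),
--     ('Travel', ['united', 'airline', 'hotel', 'travel', 'flight']),
--     ('Transportation', ['uber', 'lyft', 'taxi', 'transit', 'parking']),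
--     ('Utilities', ['electric', 'water', 'gas', 'utility', 'internet', 'phone']),
-- ]
--
-- _KW = {w: (i, name) for i, (name, kws) in enumerate(_RULES) for w in kws}
-- # keyword lengths all lie in 3..13
-- _MIN_LEN, _MAX_LEN = 3, 13
--
-- def _map_plaid_category(plaid_category: List[str]) -> str:
--     if not plaid_category:
--         return 'Other'
--     s = plaid_category[0].lower()
--     best = None
--     for i in range(len(s)):
--         for L in range(_MIN_LEN, _MAX_LEN + 1):
--             hit = _KW.get(s[i:i + L])
--             if hit is not None and (best is None or hit[0] < best[0]):
--                 best = hit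
--     return 'Other' if best is None else best[1]
-- ===== Notes on version B (the rewrite author's own statement) =====
-- stated objective: alternative
-- what changed: Inverts the search: instead of an if-chain doing a substring scan per keyword, B enumerates the substrings of the text (all lengths 3..13 at each position), looks each up in a keyword->(priority, category) hash map, and returns the category of the minimum-priority hit.
import Mathlib
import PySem

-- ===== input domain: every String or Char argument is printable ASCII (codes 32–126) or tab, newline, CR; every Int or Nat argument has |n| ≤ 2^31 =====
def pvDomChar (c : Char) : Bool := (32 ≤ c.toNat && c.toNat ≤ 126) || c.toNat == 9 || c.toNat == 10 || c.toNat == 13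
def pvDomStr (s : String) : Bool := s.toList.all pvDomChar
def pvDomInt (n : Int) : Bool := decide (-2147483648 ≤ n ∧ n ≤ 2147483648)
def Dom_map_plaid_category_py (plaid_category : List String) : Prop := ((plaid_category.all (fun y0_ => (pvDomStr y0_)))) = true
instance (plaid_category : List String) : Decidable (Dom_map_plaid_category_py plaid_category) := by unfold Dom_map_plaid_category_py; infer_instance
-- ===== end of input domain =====

-- B inverts the search: instead of an if-chain testing each keyword for substring containment, it enumerates substrings of the text and looks them up in a keyword->(priority, category) map, keeping the minimum-priority hit (alternative algorithm, same cost class).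


-- ===== PORT A =====
def map_plaid_category_py (plaid_category : List String) : String :=
  match plaid_category with
  | [] => "Other"
  | c0 :: _ =>
    let category := PySem.Str.lower c0
    if (["restaurant", "cafe", "coffee", "bar", "pub", "food", "dining"].any
        (fun w => PySem.Str.isIn w category)) then "Dining"
    else if (["amazon", "walmart", "target", "store", "shop", "retail"].any
        (fun w => PySem.Str.isIn w category)) then "Shopping"
    else if (["netflix", "spotify", "hulu", "entertainment", "movie", "theater"].any
        (fun w => PySem.Str.isIn w category)) then "Entertainment"
    else if (["united", "airline", "hotel", "travel", "flight"].any
        (fun w => PySem.Str.isIn w category)) then "Travel"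
    else if (["uber", "lyft", "taxi", "transit", "parking"].any
        (fun w => PySem.Str.isIn w category)) then "Transportation"
    else if (["electric", "water", "gas", "utility", "internet", "phone"].any
        (fun w => PySem.Str.isIn w category)) then "Utilities"
    else "Other"

-- ===== PORT B =====
def pvRules : List (String × List String) :=
  [("Dining", ["restaurant", "cafe", "coffee", "bar", "pub", "food", "dining"]),
   ("Shopping", ["amazon", "walmart", "target", "store", "shop", "retail"]),
   ("Entertainment", ["netflix", "spotify", "hulu", "entertainment", "movie", "theater"]),
   ("Travel", ["united", "airline", "hotel", "travel", "flight"]),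
   ("Transportation", ["uber", "lyft", "taxi", "transit", "parking"]),
   ("Utilities", ["electric", "water", "gas", "utility", "internet", "phone"])]

-- _KW = {w: (i, name) …}: dict with distinct keys ported as the association list in
-- insertion order (lookup = first match); keyword keys kept as List Char.
def pvKW : List (List Char × Int × String) :=
  (PySem.List.enumerate pvRules 0).flatMap
    (fun p => p.2.2.map (fun w => (w.toList, (p.1, p.2.1))))

def map_plaid_category_py_alt (plaid_category : List String) : String :=
  match plaid_category with
  | [] => "Other"
  | c0 :: _ =>
    let s := (PySem.Str.lower c0).toList
    let best := (PySem.List.pyRange 0 s.length 1).foldl (fun b i =>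
        (PySem.List.pyRange 3 14 1).foldl (fun b L =>
          match pvKW.find? (fun e => e.1 == PySem.Chars.slice s (some i) (some (i + L))) with
          | some e =>
            match b with
            | none => some e.2
            | some bv => if e.2.1 < bv.1 then some e.2 else b
          | none => b) b) (none : Option (Int × String))
    match best with
    | none => "Other"
    | some bv => bv.2

-- ===== PRECONDITION & SPEC =====
def Spec_map_plaid_category_py (plaid_category : List String) (out : String) : Prop := out = map_plaid_category_py_alt plaid_category
instance (plaid_category : List String) (out : String) : Decidable (Spec_map_plaid_category_py plaid_category out) := by unfold Spec_map_plaid_category_py; infer_instance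

-- ===== CLAIM (what is proved, stated in full; the proofs are below) =====
def Claim_equal_map_plaid_category_py : Prop := ∀ (plaid_category : List String), Dom_map_plaid_category_py plaid_category → Spec_map_plaid_category_py plaid_category (map_plaid_category_py plaid_category)

-- ===== LEMMAS AND PROOFS =====

-- proof-side vocabulary
def pvNameOf (r : Nat) : String := (pvRules.getD r ("Other", [])).1
def pvKwsOf (r : Nat) : List String := (pvRules.getD r ("Other", [])).2
def pvRuleHit (r : Nat) (cs : List Char) : Bool :=
  (pvKwsOf r).any (fun w => PySem.Chars.isIn w.toList cs)

-- the list of all keyword-map hits B's nested loops can see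
def pvHits (cs : List Char) : List (Int × String) :=
  (PySem.List.pyRange 0 cs.length 1).flatMap (fun i =>
    (PySem.List.pyRange 3 14 1).filterMap (fun L =>
      (pvKW.find? (fun e => e.1 == PySem.Chars.slice cs (some i) (some (i + L)))).map (·.2)))

def pvMin (b : Option (Int × String)) (v : Int × String) : Option (Int × String) :=
  match b with
  | none => some v
  | some bv => if v.1 < bv.1 then some v else b

def pvBest (cs : List Char) : Option (Int × String) := (pvHits cs).foldl pvMin none

lemma pvFoldl_filterMap {a b g : Type} (f : a → Option b) (op : g → b → g) :
    ∀ (l : List a) (init : g), (l.filterMap f).foldl op init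
      = l.foldl (fun acc x => match f x with | some y => op acc y | none => acc) init := by
  intro l
  induction l with
  | nil => intro init; rfl
  | cons x t ih =>
    intro init
    cases h : f x <;> simp [h, ih]

lemma pvFoldl_flatMap {a b g : Type} (f : a → List b) (op : g → b → g) :
    ∀ (l : List a) (init : g), (l.flatMap f).foldl op init
      = l.foldl (fun acc x => (f x).foldl op acc) init := by
  intro l
  induction l with
  | nil => intro init; rfl
  | cons x t ih => intro init; simp [List.flatMap_cons, List.foldl_append, ih]

lemma pvBest_eq_fold (cs : List Char) :
    ((PySem.List.pyRange 0 cs.length 1).foldl (fun b i =>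
        (PySem.List.pyRange 3 14 1).foldl (fun b L =>
          match pvKW.find? (fun e => e.1 == PySem.Chars.slice cs (some i) (some (i + L))) with
          | some e =>
            match b with
            | none => some e.2
            | some bv => if e.2.1 < bv.1 then some e.2 else b
          | none => b) b) (none : Option (Int × String))) = pvBest cs := by
  unfold pvBest pvHits
  rw [pvFoldl_flatMap]
  congr 1
  funext b i
  rw [pvFoldl_filterMap]
  congr 1
  funext b' L
  cases h : pvKW.find? (fun e => e.1 == PySem.Chars.slice cs (some i) (some (i + L))) <;>
    simp [h, pvMin]

-- every entry of the keyword map is well-formed (finite check over the 34 entries)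
lemma pvKW_entries : ∀ e ∈ pvKW, ∃ r : Nat, r < 6 ∧ e.2 = ((r : Int), pvNameOf r) ∧
    ∃ w ∈ pvKwsOf r, w.toList = e.1 := by decide

-- every keyword has length in [3, 14) and is the first (unique) match for its own key
lemma pvKW_facts : ∀ r : Nat, r < 6 → ∀ w ∈ pvKwsOf r,
    3 ≤ w.toList.length ∧ w.toList.length < 14 ∧ w.toList ≠ [] ∧
    pvKW.find? (fun e => e.1 == w.toList) = some (w.toList, ((r : Int), pvNameOf r)) := by decide

lemma pvHits_sound {cs : List Char} {v : Int × String} (hv : v ∈ pvHits cs) :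
    ∃ r : Nat, r < 6 ∧ v = ((r : Int), pvNameOf r) ∧ pvRuleHit r cs = true := by
  unfold pvHits at hv
  obtain ⟨i, hi, hv2⟩ := List.mem_flatMap.mp hv
  obtain ⟨L, hL, hv3⟩ := List.mem_filterMap.mp hv2
  obtain ⟨e, hfind, hev⟩ := Option.map_eq_some_iff.mp hv3
  have hpe := List.find?_some hfind
  have hmemKW := List.mem_of_find?_eq_some hfind
  obtain ⟨r, hr6, he2, w, hw, hwe⟩ := pvKW_entries e hmemKW
  have hi' : 0 ≤ i := by
    have := (PySem.List.mem_pyRange_one).mp hi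
    omega
  have hL' : 0 ≤ L := by
    have := (PySem.List.mem_pyRange_one).mp hL
    omega
  refine ⟨r, hr6, by rw [← hev, he2], ?_⟩
  have heq : e.1 = PySem.Chars.slice cs (some i) (some (i + L)) := by
    exact eq_of_beq (by simpa using hpe)
  have hpref : e.1 <+: cs.drop i.toNat := by
    rw [heq, PySem.Chars.slice_eq_listSlice, PySem.List.slice_toNat _ hi' (by omega)]
    exact List.take_prefix _ _
  have hin : PySem.Chars.isIn e.1 cs = true :=
    (PySem.Chars.exists_prefix_drop_iff_isIn _ _).mp ⟨i.toNat, hpref⟩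
  simp only [pvRuleHit, List.any_eq_true]
  exact ⟨w, hw, by rw [hwe]; exact hin⟩

lemma pvHits_complete {cs : List Char} {r : Nat} (hr : r < 6) (hh : pvRuleHit r cs = true) :
    ((r : Int), pvNameOf r) ∈ pvHits cs := by
  simp only [pvRuleHit, List.any_eq_true] at hh
  obtain ⟨w, hw, hin⟩ := hh
  obtain ⟨hlen3, hlen14, hne, hfind⟩ := pvKW_facts r hr w hw
  obtain ⟨j, hpref⟩ := (PySem.Chars.exists_prefix_drop_iff_isIn _ _).mpr hin
  have hjlt : j < cs.length := by
    by_contra hge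
    push Not at hge
    rw [List.drop_eq_nil_of_le hge] at hpref
    exact hne (List.prefix_nil.mp hpref)
  have hslice : PySem.Chars.slice cs (some (j : Int)) (some ((j : Int) + (w.toList.length : Int)))
      = w.toList := by
    rw [PySem.Chars.slice_eq_listSlice, PySem.List.slice_natCast_add]
    exact (List.prefix_iff_eq_take.mp hpref).symm
  unfold pvHits
  refine List.mem_flatMap.mpr ⟨(j : Int), ?_,
    List.mem_filterMap.mpr ⟨(w.toList.length : Int), ?_, ?_⟩⟩
  · rw [PySem.List.mem_pyRange_one]; omega
  · rw [PySem.List.mem_pyRange_one]; omega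
  · simp only [hslice, hfind, Option.map_some]

lemma pvMin_fold_le_acc : ∀ (hs : List (Int × String)) (c v : Int × String),
    hs.foldl pvMin (some c) = some v → v.1 ≤ c.1 := by
  intro hs
  induction hs with
  | nil =>
    intro c v h
    simp only [List.foldl_nil, Option.some.injEq] at h
    rw [← h]
  | cons u t ih =>
    intro c v h
    simp only [List.foldl_cons, pvMin] at h
    split at h
    · have := ih u v h; omega
    · exact ih c v h

lemma pvMin_fold_some : ∀ (hs : List (Int × String)) (c : Int × String),
    ∃ v, hs.foldl pvMin (some c) = some v := by
  intro hs
  induction hs with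
  | nil => intro c; exact ⟨c, rfl⟩
  | cons u t ih =>
    intro c
    simp only [List.foldl_cons, pvMin]
    split
    · exact ih u
    · exact ih c

lemma pvMin_fold_ne_none : ∀ (hs : List (Int × String)) (b : Option (Int × String)),
    hs ≠ [] → hs.foldl pvMin b ≠ none := by
  intro hs b hne
  cases hs with
  | nil => exact absurd rfl hne
  | cons u t =>
    simp only [List.foldl_cons]
    have : ∃ c, pvMin b u = some c := by
      cases b with
      | none => exact ⟨u, rfl⟩
      | some bv =>
        simp only [pvMin]
        split
        · exact ⟨u, rfl⟩
        · exact ⟨bv, rfl⟩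
    obtain ⟨c, hc⟩ := this
    rw [hc]
    obtain ⟨v, hv⟩ := pvMin_fold_some t c
    rw [hv]
    simp

lemma pvMin_fold_mem : ∀ (hs : List (Int × String)) (b v : Option (Int × String)),
    hs.foldl pvMin b = v → v = b ∨ ∃ u ∈ hs, v = some u := by
  intro hs
  induction hs with
  | nil => intro b v h; exact Or.inl h.symm
  | cons u t ih =>
    intro b v h
    simp only [List.foldl_cons] at h
    rcases ih (pvMin b u) v h with h1 | ⟨u', hu', h2⟩
    · cases b with
      | none => exact Or.inr ⟨u, List.mem_cons_self, by simpa [pvMin] using h1⟩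
      | some bv =>
        by_cases hlt : u.1 < bv.1
        · exact Or.inr ⟨u, List.mem_cons_self, by simpa [pvMin, hlt] using h1⟩
        · exact Or.inl (by simpa [pvMin, hlt] using h1)
    · exact Or.inr ⟨u', List.mem_cons_of_mem _ hu', h2⟩

lemma pvMin_fold_le : ∀ (hs : List (Int × String)) (b : Option (Int × String)) (v : Int × String),
    hs.foldl pvMin b = some v → ∀ u ∈ hs, v.1 ≤ u.1 := by
  intro hs
  induction hs with
  | nil => intro b v _ u hu; exact absurd hu (List.not_mem_nil)
  | cons u0 t ih =>
    intro b v h u hu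
    simp only [List.foldl_cons] at h
    rcases List.mem_cons.mp hu with rfl | hu'
    · cases b with
      | none => exact pvMin_fold_le_acc t u v (by simpa [pvMin] using h)
      | some bv =>
        by_cases hlt : u.1 < bv.1
        · exact pvMin_fold_le_acc t u v (by simpa [pvMin, hlt] using h)
        · have := pvMin_fold_le_acc t bv v (by simpa [pvMin, hlt] using h); omega
    · exact ih (pvMin b u0) v h u hu'

lemma pvBest_of_min {cs : List Char} {r : Nat} (hr : r < 6) (hh : pvRuleHit r cs = true)
    (hmin : ∀ r' : Nat, r' < r → pvRuleHit r' cs = false) :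
    pvBest cs = some ((r : Int), pvNameOf r) := by
  have hmem := pvHits_complete hr hh
  have hnn : pvBest cs ≠ none := pvMin_fold_ne_none (pvHits cs) none (List.ne_nil_of_mem hmem)
  obtain ⟨v, hv⟩ := Option.ne_none_iff_exists'.mp hnn
  rcases pvMin_fold_mem (pvHits cs) none (some v) hv with h1 | ⟨u, hu, h2⟩
  · exact absurd h1 (by simp)
  · have hvu : v = u := Option.some.inj h2
    subst hvu
    obtain ⟨r', hr6', hveq, hhit'⟩ := pvHits_sound hu
    have hle : v.1 ≤ ((r : Nat) : Int) := pvMin_fold_le (pvHits cs) none v hv _ hmem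
    have hnotlt : ¬ r' < r := by
      intro hlt
      rw [hmin r' hlt] at hhit'
      exact Bool.false_ne_true hhit'
    have hr'r : r' = r := by
      rw [hveq] at hle
      simp only at hle
      omega
    rw [hv, hveq, hr'r]

lemma pvBest_of_none {cs : List Char} (hall : ∀ r : Nat, r < 6 → pvRuleHit r cs = false) :
    pvBest cs = none := by
  have hnil : pvHits cs = [] := by
    rw [List.eq_nil_iff_forall_not_mem]
    intro v hvmem
    obtain ⟨r, hr6, _, hhit⟩ := pvHits_sound hvmem
    rw [hall r hr6] at hhit
    exact Bool.false_ne_true hhit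
  unfold pvBest
  rw [hnil]
  rfl

-- ===== VERDICT (by name: the statement is the Claim_ definition above) =====
theorem map_plaid_category_py_spec : Claim_equal_map_plaid_category_py := by
  intro pc _
  unfold Spec_map_plaid_category_py
  cases pc with
  | nil => rfl
  | cons c0 rest =>
    have hB : map_plaid_category_py_alt (c0 :: rest)
        = (match pvBest ((PySem.Str.lower c0).toList) with
           | none => "Other"
           | some bv => bv.2) := by
      simp only [map_plaid_category_py_alt]
      rw [pvBest_eq_fold]
    rw [hB]
    have e0 : (["restaurant", "cafe", "coffee", "bar", "pub", "food", "dining"].any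
        (fun w => PySem.Str.isIn w (PySem.Str.lower c0)))
        = pvRuleHit 0 ((PySem.Str.lower c0).toList) := by
      simp [pvRuleHit, pvKwsOf, pvRules]
    have e1 : (["amazon", "walmart", "target", "store", "shop", "retail"].any
        (fun w => PySem.Str.isIn w (PySem.Str.lower c0)))
        = pvRuleHit 1 ((PySem.Str.lower c0).toList) := by
      simp [pvRuleHit, pvKwsOf, pvRules]
    have e2 : (["netflix", "spotify", "hulu", "entertainment", "movie", "theater"].any
        (fun w => PySem.Str.isIn w (PySem.Str.lower c0)))
        = pvRuleHit 2 ((PySem.Str.lower c0).toList) := by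
      simp [pvRuleHit, pvKwsOf, pvRules]
    have e3 : (["united", "airline", "hotel", "travel", "flight"].any
        (fun w => PySem.Str.isIn w (PySem.Str.lower c0)))
        = pvRuleHit 3 ((PySem.Str.lower c0).toList) := by
      simp [pvRuleHit, pvKwsOf, pvRules]
    have e4 : (["uber", "lyft", "taxi", "transit", "parking"].any
        (fun w => PySem.Str.isIn w (PySem.Str.lower c0)))
        = pvRuleHit 4 ((PySem.Str.lower c0).toList) := by
      simp [pvRuleHit, pvKwsOf, pvRules]
    have e5 : (["electric", "water", "gas", "utility", "internet", "phone"].any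
        (fun w => PySem.Str.isIn w (PySem.Str.lower c0)))
        = pvRuleHit 5 ((PySem.Str.lower c0).toList) := by
      simp [pvRuleHit, pvKwsOf, pvRules]
    simp only [map_plaid_category_py, e0, e1, e2, e3, e4, e5]
    cases h0 : pvRuleHit 0 ((PySem.Str.lower c0).toList) with
    | true =>
      have hb := pvBest_of_min (cs := ((PySem.Str.lower c0).toList)) (r := 0)
        (by omega) h0 (fun r' hlt => absurd hlt (Nat.not_lt_zero r'))
      rw [hb]
      simp [pvNameOf, pvRules]
    | false =>
    cases h1 : pvRuleHit 1 ((PySem.Str.lower c0).toList) with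
    | true =>
      have hb := pvBest_of_min (cs := ((PySem.Str.lower c0).toList)) (r := 1)
        (by omega) h1 (by intro r' hlt; rcases (by omega : r' = 0) with rfl; exact h0)
      rw [hb]
      simp [pvNameOf, pvRules, h0]
    | false =>
    cases h2 : pvRuleHit 2 ((PySem.Str.lower c0).toList) with
    | true =>
      have hb := pvBest_of_min (cs := ((PySem.Str.lower c0).toList)) (r := 2)
        (by omega) h2 (by intro r' hlt; rcases (by omega : r' = 0 ∨ r' = 1) with rfl|rfl; exacts [h0, h1])
      rw [hb]
      simp [pvNameOf, pvRules, h0, h1]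
    | false =>
    cases h3 : pvRuleHit 3 ((PySem.Str.lower c0).toList) with
    | true =>
      have hb := pvBest_of_min (cs := ((PySem.Str.lower c0).toList)) (r := 3)
        (by omega) h3 (by intro r' hlt; rcases (by omega : r' = 0 ∨ r' = 1 ∨ r' = 2) with rfl|rfl|rfl; exacts [h0, h1, h2])
      rw [hb]
      simp [pvNameOf, pvRules, h0, h1, h2]
    | false =>
    cases h4 : pvRuleHit 4 ((PySem.Str.lower c0).toList) with
    | true =>
      have hb := pvBest_of_min (cs := ((PySem.Str.lower c0).toList)) (r := 4)
        (by omega) h4 (by intro r' hlt; rcases (by omega : r' = 0 ∨ r' = 1 ∨ r' = 2 ∨ r' = 3) with rfl|rfl|rfl|rfl; exacts [h0, h1, h2, h3])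
      rw [hb]
      simp [pvNameOf, pvRules, h0, h1, h2, h3]
    | false =>
    cases h5 : pvRuleHit 5 ((PySem.Str.lower c0).toList) with
    | true =>
      have hb := pvBest_of_min (cs := ((PySem.Str.lower c0).toList)) (r := 5)
        (by omega) h5 (by intro r' hlt; rcases (by omega : r' = 0 ∨ r' = 1 ∨ r' = 2 ∨ r' = 3 ∨ r' = 4) with rfl|rfl|rfl|rfl|rfl; exacts [h0, h1, h2, h3, h4])
      rw [hb]
      simp [pvNameOf, pvRules, h0, h1, h2, h3, h4]
    | false =>
      have hb := pvBest_of_none (cs := ((PySem.Str.lower c0).toList))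
        (by intro r hlt; rcases (by omega : r = 0 ∨ r = 1 ∨ r = 2 ∨ r = 3 ∨ r = 4 ∨ r = 5) with rfl|rfl|rfl|rfl|rfl|rfl; exacts [h0, h1, h2, h3, h4, h5])
      rw [hb]
      simp [h0, h1, h2, h3, h4, h5]
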